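-- pv_equiv track=rewrite | github.com/Thanhbinh1524/BTBuoi4 | 5.5.py | simplify_expression
-- ===== SOURCE A (Python) =====
-- def simplify_expression(expr):
--     stack = []
--     sign = 1  # Dấu hiện tại, 1: dương, -1: âm
--     result = []
--     stack_sign = [1]  # Stack lưu dấu
--
--     for char in expr:
--         if char == '+':
--             result.append('+' if sign == 1 else '-')
--         elif char == '-':
--             result.append('-' if sign == 1 else '+')
--         elif char == '(':
--             stack.append(sign)
--         elif char == ')':
--             stack.pop()
--         else:
--             result.append(char)
--
--         if char in '+-':
--             sign = stack[-1] if stack else 1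
--
--     simplified = []
--     # Xóa dấu '+' không cần thiết
--     for i, c in enumerate(result):
--         if i == 0 and c == '+':
--             continue
--         if c == '+' and (i == 0 or result[i - 1] in '+-'):
--             continue
--         simplified.append(c)
--     return ''.join(simplified)
-- ===== SOURCE B (Python) =====
-- def simplify_expression(expr):
--     out = []
--     for ch in expr:
--         if ch == '(' or ch == ')':
--             continue
--         if ch == '+' and (not out or out[-1] in '+-'):
--             continue
--         out.append(ch)
--     return ''.join(out)
-- ===== Notes on version B (the rewrite author's own statement) =====
-- stated objective: simpler
-- what changed: B replaces A's sign-stack bookkeeping (the tracked sign is provably always 1) and A's two sequential passes (build a parenthesis-free list, then filter redundant plus signs) by one direct pass that skips parentheses and drops a plus sign exactly when nothing has been emitted yet or the last emitted character is a sign.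
import Mathlib
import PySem

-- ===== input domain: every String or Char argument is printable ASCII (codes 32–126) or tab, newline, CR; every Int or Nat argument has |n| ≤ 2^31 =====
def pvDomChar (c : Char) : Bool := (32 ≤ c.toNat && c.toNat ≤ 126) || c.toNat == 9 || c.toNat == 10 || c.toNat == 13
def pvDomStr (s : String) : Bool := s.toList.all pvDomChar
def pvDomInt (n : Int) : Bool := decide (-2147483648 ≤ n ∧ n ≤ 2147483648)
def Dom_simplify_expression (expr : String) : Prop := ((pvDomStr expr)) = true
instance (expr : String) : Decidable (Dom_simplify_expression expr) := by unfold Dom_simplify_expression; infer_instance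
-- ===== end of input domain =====

-- B rewrites A's two passes (sign-stack build of a parenthesis-free list, then a filter of redundant
-- plus signs) as one direct pass over the string; equivalence is proved on Pre_ (prefix-balanced inputs).

-- ===== PORT A =====
-- one iteration of A's first loop; `none` = the IndexError of stack.pop() on an empty stack
def pvStepA (st : List Int × Int × List Char) (c : Char) : Option (List Int × Int × List Char) :=
  let stack := st.1
  let sign := st.2.1
  let result := st.2.2
  let step1 : Option (List Int × List Char) :=
    if c = '+' then some (stack, result ++ [if sign = 1 then '+' else '-'])
    else if c = '-' then some (stack, result ++ [if sign = 1 then '-' else '+'])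
    else if c = '(' then some (stack ++ [sign], result)
    else if c = ')' then (PySem.List.pop? stack).map (fun p => (p.2, result))
    else some (stack, result ++ [c])
  step1.map (fun p =>
    -- `if char in '+-': sign = stack[-1] if stack else 1`; stack[-1] is only read when stack ≠ []
    (p.1, (if c = '+' ∨ c = '-' then (if p.1 = [] then 1 else (PySem.List.pyGet? p.1 (-1)).getD 1) else sign), p.2))

def simplify_expression (expr : String) : String :=
  match expr.toList.foldl (fun st? c => st?.bind (fun st => pvStepA st c)) (some ([], 1, [])) with
  | none => ""   -- unreachable inside Pre_ (the Python raises IndexError here)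
  | some st =>
    let result := st.2.2
    -- second loop: `for i, c in enumerate(result)` dropping redundant '+'
    String.ofList ((PySem.List.enumerate result).foldl (fun simplified ic =>
        if ic.1 = 0 ∧ ic.2 = '+' then simplified
        else if ic.2 = '+' ∧ (ic.1 = 0 ∨ PySem.List.pyGet? result (ic.1 - 1) = some '+'
                                        ∨ PySem.List.pyGet? result (ic.1 - 1) = some '-') then simplified
        else simplified ++ [ic.2]) [])

-- ===== PORT B =====
def simplify_expression_alt (expr : String) : String :=
  String.ofList (expr.toList.foldl (fun out ch =>
    if ch = '(' ∨ ch = ')' then out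
    else if ch = '+' ∧ (out = [] ∨ PySem.List.pyGet? out (-1) = some '+'
                                 ∨ PySem.List.pyGet? out (-1) = some '-') then out
    else out ++ [ch]) [])

-- ===== PRECONDITION & SPEC =====
-- Pre_ excludes exactly the inputs on which A raises IndexError (stack.pop() on an empty stack):
-- some prefix of expr holds more closing than opening parentheses. B still returns normally there.
def Pre_simplify_expression (expr : String) : Prop :=
  ∀ n ≤ expr.toList.length, (expr.toList.take n).count ')' ≤ (expr.toList.take n).count '('
instance (expr : String) : Decidable (Pre_simplify_expression expr) := by
  unfold Pre_simplify_expression; infer_instance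
def pvWitness_simplify_expression : String := "a+(b-c)"

def Spec_simplify_expression (expr : String) (out : String) : Prop := out = simplify_expression_alt expr
instance (expr : String) (out : String) : Decidable (Spec_simplify_expression expr out) := by unfold Spec_simplify_expression; infer_instance

-- ===== CLAIM (what is proved, stated in full; the proofs are below) =====
def Claim_equal_simplify_expression : Prop := ∀ (expr : String), Dom_simplify_expression expr → Pre_simplify_expression expr → Spec_simplify_expression expr (simplify_expression expr)


-- ===== LEMMAS AND PROOFS =====

def pvKeep (cs : List Char) : List Char := cs.filter (fun c => !(c == '(' || c == ')'))

def pvAf (prev : Option Char) : List Char → List Char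
  | [] => []
  | c :: cs =>
    if c = '+' ∧ (prev = none ∨ prev = some '+' ∨ prev = some '-') then pvAf (some c) cs
    else c :: pvAf (some c) cs

def pvBstep (out : List Char) (ch : Char) : List Char :=
  if ch = '(' ∨ ch = ')' then out
  else if ch = '+' ∧ (out = [] ∨ out.getLast? = some '+' ∨ out.getLast? = some '-') then out
  else out ++ [ch]

theorem pvLoopA (cs : List Char) (stack : List Int) (result : List Char)
    (hst : ∀ x ∈ stack, x = 1)
    (hbal : ∀ n ≤ cs.length, (cs.take n).count ')' ≤ stack.length + (cs.take n).count '(') :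
    ∃ stack', (∀ x ∈ stack', x = 1) ∧
      cs.foldl (fun st? c => st?.bind (fun st => pvStepA st c)) (some (stack, 1, result))
        = some (stack', 1, result ++ pvKeep cs) := by
  induction cs generalizing stack result with
  | nil => exact ⟨stack, hst, by simp [pvKeep]⟩
  | cons c cs ih =>
    rw [List.foldl_cons]
    have hbal' : ∀ n ≤ cs.length, ((c :: cs).take (n+1)).count ')'
        ≤ stack.length + ((c :: cs).take (n+1)).count '(' := by
      intro n hn
      exact hbal (n+1) (by simpa using Nat.succ_le_succ hn)
    by_cases hp : c = '+'
    · subst hp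
      have hsg : (if (stack = []) then (1:Int) else (PySem.List.pyGet? stack (-1)).getD 1) = 1 := by
        rcases List.eq_nil_or_concat stack with rfl | ⟨s', x, hx⟩
        · simp
        · rw [List.concat_eq_append] at hx
          subst hx
          have hx1 : x = 1 := hst x (by simp)
          simp [PySem.List.pyGet?_neg_one, hx1]
      have hstep : pvStepA (stack, 1, result) '+' = some (stack, 1, result ++ ['+']) := by
        simp [pvStepA, hsg]
      rw [Option.bind_some, hstep]
      have hk : pvKeep ('+' :: cs) = '+' :: pvKeep cs := by simp [pvKeep]
      obtain ⟨stack', h1, h2⟩ := ih stack (result ++ ['+']) hst (by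
        intro n hn
        have := hbal' n hn
        simpa using this)
      exact ⟨stack', h1, by rw [h2, hk]; simp⟩
    · by_cases hm : c = '-'
      · subst hm
        have hsg : (if (stack = []) then (1:Int) else (PySem.List.pyGet? stack (-1)).getD 1) = 1 := by
          rcases List.eq_nil_or_concat stack with rfl | ⟨s', x, hx⟩
          · simp
          · rw [List.concat_eq_append] at hx
            subst hx
            have hx1 : x = 1 := hst x (by simp)
            simp [PySem.List.pyGet?_neg_one, hx1]
        have hstep : pvStepA (stack, 1, result) '-' = some (stack, 1, result ++ ['-']) := by
          simp [pvStepA, hsg]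
        rw [Option.bind_some, hstep]
        have hk : pvKeep ('-' :: cs) = '-' :: pvKeep cs := by simp [pvKeep]
        obtain ⟨stack', h1, h2⟩ := ih stack (result ++ ['-']) hst (by
          intro n hn
          have := hbal' n hn
          simpa using this)
        exact ⟨stack', h1, by rw [h2, hk]; simp⟩
      · by_cases ho : c = '('
        · subst ho
          have hstep : pvStepA (stack, 1, result) '(' = some (stack ++ [1], 1, result) := by
            simp [pvStepA]
          rw [Option.bind_some, hstep]
          have hk : pvKeep ('(' :: cs) = pvKeep cs := by simp [pvKeep]
          obtain ⟨stack', h1, h2⟩ := ih (stack ++ [1]) result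
            (by intro x hx; rcases List.mem_append.mp hx with h | h
                · exact hst x h
                · simpa using h) (by
            intro n hn
            have := hbal' n hn
            simp [List.take_succ_cons] at this ⊢
            omega)
          exact ⟨stack', h1, by rw [h2, hk]⟩
        · by_cases hcl : c = ')'
          · subst hcl
            have hne : stack ≠ [] := by
              have := hbal 1 (by simp)
              intro hnil
              subst hnil
              simp at this
            rcases List.eq_nil_or_concat stack with rfl | ⟨s', x, hx⟩
            · exact absurd rfl hne
            rw [List.concat_eq_append] at hx
            subst hx
            have hstep : pvStepA (s' ++ [x], 1, result) ')' = some (s', 1, result) := by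
              simp [pvStepA, PySem.List.pop?_last]
            rw [Option.bind_some, hstep]
            have hk : pvKeep (')' :: cs) = pvKeep cs := by simp [pvKeep]
            obtain ⟨stack', h1, h2⟩ := ih s' result
              (fun y hy => hst y (List.mem_append.mpr (Or.inl hy))) (by
              intro n hn
              have := hbal' n hn
              simp [List.take_succ_cons] at this ⊢
              omega)
            exact ⟨stack', h1, by rw [h2, hk]⟩
          · have hstep : pvStepA (stack, 1, result) c = some (stack, 1, result ++ [c]) := by
              simp [pvStepA, hp, hm, ho, hcl]
            rw [Option.bind_some, hstep]
            have hk : pvKeep (c :: cs) = c :: pvKeep cs := by simp [pvKeep, ho, hcl]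
            obtain ⟨stack', h1, h2⟩ := ih stack (result ++ [c]) hst (by
              intro n hn
              have := hbal' n hn
              simp [List.take_succ_cons, ho, hcl] at this ⊢
              omega)
            exact ⟨stack', h1, by rw [h2, hk]; simp⟩

theorem pvAfilter_eq (r : List Char) (s t acc : List Char) (hr : r = t ++ s) :
    (PySem.List.enumerate s (t.length : Int)).foldl (fun simplified ic =>
        if ic.1 = 0 ∧ ic.2 = '+' then simplified
        else if ic.2 = '+' ∧ (ic.1 = 0 ∨ PySem.List.pyGet? r (ic.1 - 1) = some '+'
                                        ∨ PySem.List.pyGet? r (ic.1 - 1) = some '-') then simplified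
        else simplified ++ [ic.2]) acc
      = acc ++ pvAf t.getLast? s := by
  induction s generalizing t acc with
  | nil => simp [pvAf, PySem.List.enumerate]
  | cons c cs ih =>
    rw [PySem.List.enumerate_cons, List.foldl_cons]
    have hlen : ((t.length : Int) + 1) = (((t ++ [c]).length : Int)) := by simp
    have hrec := fun acc2 => ih (t ++ [c]) acc2 (hr.trans (by simp))
    rcases List.eq_nil_or_concat t with rfl | ⟨t', p, ht⟩
    · by_cases hc : c = '+'
      · rw [show ((List.length ([] : List Char) : Int)) = 0 by simp, if_pos ⟨rfl, hc⟩]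
        simp only [List.nil_append] at hrec
        rw [show ((0:Int) + 1) = ((List.length ([c] : List Char) : Int)) by simp, hrec acc]
        simp [pvAf, hc]
      · have h1 : ¬((0 : Int) = 0 ∧ c = '+') := by simp [hc]
        have h2 : ¬(c = '+' ∧ ((0:Int) = 0 ∨ PySem.List.pyGet? r ((0:Int) - 1) = some '+'
                  ∨ PySem.List.pyGet? r ((0:Int) - 1) = some '-')) := by simp [hc]
        rw [show ((List.length ([] : List Char) : Int)) = 0 by simp, if_neg h1, if_neg h2]
        simp only [List.nil_append] at hrec
        rw [show ((0:Int) + 1) = ((List.length ([c] : List Char) : Int)) by simp, hrec (acc ++ [c])]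
        simp [pvAf, hc]
    · rw [List.concat_eq_append] at ht
      subst ht
      have hidx : PySem.List.pyGet? r (((t' ++ [p]).length : Int) - 1) = some p := by
        rw [show (((t' ++ [p]).length : Int) - 1) = (t'.length : Int) by simp, hr,
          show (t' ++ [p]) ++ (c :: cs) = t' ++ (p :: (c :: cs)) by simp]
        exact PySem.List.pyGet?_append_length t' _ p
      have hne : ((t' ++ [p]).length : Int) ≠ 0 := by
        simp only [List.length_append, List.length_singleton]
        push_cast
        omega
      have h1 : ¬(((t' ++ [p]).length : Int) = 0 ∧ c = '+') := fun h => hne h.1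
      by_cases hc : c = '+' ∧ (p = '+' ∨ p = '-')
      · have h2 : c = '+' ∧ (((t' ++ [p]).length : Int) = 0
            ∨ PySem.List.pyGet? r (((t' ++ [p]).length : Int) - 1) = some '+'
            ∨ PySem.List.pyGet? r (((t' ++ [p]).length : Int) - 1) = some '-') := by
          refine ⟨hc.1, Or.inr ?_⟩
          rw [hidx]
          rcases hc.2 with h | h <;> simp [h]
        have hgl : (t' ++ [p]).getLast? = some p := by simp
        have hcondp : c = '+' ∧ ((t' ++ [p]).getLast? = none ∨ (t' ++ [p]).getLast? = some '+'
            ∨ (t' ++ [p]).getLast? = some '-') := by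
          rw [hgl]
          exact ⟨hc.1, Or.inr (by rcases hc.2 with h | h <;> simp [h])⟩
        rw [if_neg h1, if_pos h2, hlen, hrec acc]
        simp only [pvAf]
        rw [if_pos hcondp]
        simp
      · have h2 : ¬(c = '+' ∧ (((t' ++ [p]).length : Int) = 0
            ∨ PySem.List.pyGet? r (((t' ++ [p]).length : Int) - 1) = some '+'
            ∨ PySem.List.pyGet? r (((t' ++ [p]).length : Int) - 1) = some '-')) := by
          rw [hidx]
          intro hx
          rcases hx.2 with h | h | h
          · exact hne h
          · exact hc ⟨hx.1, Or.inl (by injection h)⟩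
          · exact hc ⟨hx.1, Or.inr (by injection h)⟩
        rw [if_neg h1, if_neg h2, hlen, hrec (acc ++ [c])]
        have hcond : ¬(c = '+' ∧ ((t' ++ [p]).getLast? = none ∨ (t' ++ [p]).getLast? = some '+'
            ∨ (t' ++ [p]).getLast? = some '-')) := by
          simp only [List.getLast?_append, List.getLast?_singleton]
          intro hx
          rcases hx.2 with h | h | h
          · simp at h
          · exact hc ⟨hx.1, Or.inl (by injection h)⟩
          · exact hc ⟨hx.1, Or.inr (by injection h)⟩
        simp only [pvAf]
        rw [if_neg hcond]
        simp

theorem pvBfilt (cs out : List Char) :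
    cs.foldl pvBstep out = (pvKeep cs).foldl pvBstep out := by
  induction cs generalizing out with
  | nil => rfl
  | cons c cs ih =>
    by_cases hc : c = '(' ∨ c = ')'
    · rcases hc with h | h <;> simp [pvKeep, pvBstep, h, ih]
    · have hk : pvKeep (c :: cs) = c :: pvKeep cs := by
        rcases (not_or.mp hc) with ⟨h1, h2⟩; simp [pvKeep, h1, h2]
      rw [hk, List.foldl_cons, List.foldl_cons, ih]

theorem pvBf (cs out : List Char) (prev : Option Char)
    (hp : ∀ c ∈ cs, ¬(c = '(' ∨ c = ')'))
    (h : (out = [] ∨ out.getLast? = some '+' ∨ out.getLast? = some '-')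
         ↔ (prev = none ∨ prev = some '+' ∨ prev = some '-')) :
    cs.foldl pvBstep out = out ++ pvAf prev cs := by
  induction cs generalizing out prev with
  | nil => simp [pvAf]
  | cons c cs ih =>
    have hc := hp c (by simp)
    rw [List.foldl_cons]
    by_cases hcond : c = '+' ∧ (out = [] ∨ out.getLast? = some '+' ∨ out.getLast? = some '-')
    · have hcond' : c = '+' ∧ (prev = none ∨ prev = some '+' ∨ prev = some '-') :=
        ⟨hcond.1, h.mp hcond.2⟩
      simp only [pvAf, pvBstep, if_pos hcond', if_neg hc, if_pos hcond]
      exact ih out (some c) (fun d hd => hp d (by simp [hd])) (by simp [hcond.1, hcond.2])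
    · have hcond' : ¬(c = '+' ∧ (prev = none ∨ prev = some '+' ∨ prev = some '-')) := by
        intro hx; exact hcond ⟨hx.1, h.mpr hx.2⟩
      simp only [pvAf, pvBstep, if_neg hcond', if_neg hc, if_neg hcond]
      rw [ih (out ++ [c]) (some c) (fun d hd => hp d (by simp [hd])) (by simp),
        List.append_assoc, List.singleton_append]

theorem pvA_char (expr : String) (hpre : Pre_simplify_expression expr) :
    simplify_expression expr = String.ofList (pvAf none (pvKeep expr.toList)) := by
  obtain ⟨stack', h1, h2⟩ := pvLoopA expr.toList [] [] (by simp) (by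
    intro n hn
    simpa using hpre n hn)
  unfold simplify_expression
  rw [h2]
  simp only [List.nil_append]
  have := pvAfilter_eq (pvKeep expr.toList) (pvKeep expr.toList) [] [] (by simp)
  simp only [List.length_nil, Int.natCast_zero, List.nil_append, List.getLast?_nil] at this
  exact congrArg String.ofList this

theorem pvB_char (expr : String) :
    simplify_expression_alt expr = String.ofList (pvAf none (pvKeep expr.toList)) := by
  unfold simplify_expression_alt
  have hl : (fun (out : List Char) (ch : Char) =>
      if ch = '(' ∨ ch = ')' then out
      else if ch = '+' ∧ (out = [] ∨ PySem.List.pyGet? out (-1) = some '+'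
                                   ∨ PySem.List.pyGet? out (-1) = some '-') then out
      else out ++ [ch]) = pvBstep := by
    funext out ch
    simp [pvBstep, PySem.List.pyGet?_neg_one]
  rw [hl, pvBfilt, pvBf (pvKeep expr.toList) [] none
    (by
      intro c hc
      have := List.of_mem_filter hc
      simpa using this)
    (by simp)]
  simp

-- ===== VERDICT (by name: the statement is the Claim_ definition above) =====
theorem simplify_expression_spec : Claim_equal_simplify_expression := by
  intro expr _ hpre
  unfold Spec_simplify_expression
  rw [pvA_char expr hpre, pvB_char expr]
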